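-- pv_equiv track=rewrite | github.com/arkin0x/cyberspace-cli | find_strategic_keypair_v2.py | compute_sectors_from_pubkey
-- ===== SOURCE A (Python) =====
-- def compute_sectors_from_pubkey(pubkey_hex):
--     """Compute XYZ sectors from pubkey (used as coord256 directly)."""
--     coord_int = int.from_bytes(bytes.fromhex(pubkey_hex), 'big')
--
--     # De-interleave XYZXYZ...P pattern
--     x, y, z = 0, 0, 0
--     for i in range(85):
--         x |= ((coord_int >> (i * 3)) & 1) << i
--         y |= ((coord_int >> (i * 3 + 1)) & 1) << i
--         z |= ((coord_int >> (i * 3 + 2)) & 1) << i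
--
--     # Extract sectors (top 55 bits of each 85-bit coordinate)
--     return x >> 30, y >> 30, z >> 30
-- ===== SOURCE B (Python) =====
-- def compute_sectors_from_pubkey(pubkey_hex):
--     """Compute XYZ sectors from pubkey (used as coord256 directly)."""
--     coord = int.from_bytes(bytes.fromhex(pubkey_hex), 'big')
--     # Single MSB-to-LSB pass: route bit k to coordinate k % 3, Horner-style.
--     x = y = z = 0
--     for k in range(254, -1, -1):
--         b = (coord >> k) & 1
--         r = k % 3
--         if r == 0:
--             x = 2 * x + b
--         elif r == 1:
--             y = 2 * y + b
--         else:
--             z = 2 * z + b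
--     return x >> 30, y >> 30, z >> 30
-- ===== Notes on version B (the rewrite author's own statement) =====
-- stated objective: alternative
-- what changed: A de-interleaves with an 85-iteration loop that extracts bits 3i, 3i+1, 3i+2 and ORs each into place with per-bit shifts; B makes one MSB-to-LSB pass over bits 254..0, routing bit k to coordinate k % 3 Horner-style (x = 2*x + b), with no OR/shift positional assembly.
import Mathlib
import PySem

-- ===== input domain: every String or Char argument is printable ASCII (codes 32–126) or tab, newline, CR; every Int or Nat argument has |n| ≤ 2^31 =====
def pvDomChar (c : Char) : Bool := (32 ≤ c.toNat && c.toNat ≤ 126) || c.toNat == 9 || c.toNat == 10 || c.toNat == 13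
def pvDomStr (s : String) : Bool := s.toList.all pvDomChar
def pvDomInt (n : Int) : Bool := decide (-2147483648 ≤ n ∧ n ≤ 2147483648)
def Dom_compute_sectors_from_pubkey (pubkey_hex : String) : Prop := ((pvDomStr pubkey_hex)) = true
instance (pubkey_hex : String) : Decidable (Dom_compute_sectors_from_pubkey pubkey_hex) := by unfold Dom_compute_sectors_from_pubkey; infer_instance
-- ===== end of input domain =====

-- B replaces A's 85-iteration OR/shift de-interleaving loop by a single MSB-to-LSB Horner pass
-- that routes bit k of the coordinate to component k % 3 (objective: alternative algorithm).


-- ===== PORT A =====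
-- int.from_bytes(bytes.fromhex(s), 'big'), ported by hand (no PySem primitive for bytes.fromhex):
-- bytes.fromhex skips ASCII whitespace between byte pairs (on the Dom alphabet that is space/tab/LF/CR)
-- and requires two adjacent hex digits per byte; `none` is exactly Python's ValueError.
def pvHexDigit? (c : Char) : Option Nat :=
  if 48 ≤ c.toNat ∧ c.toNat ≤ 57 then some (c.toNat - 48)
  else if 97 ≤ c.toNat ∧ c.toNat ≤ 102 then some (c.toNat - 87)
  else if 65 ≤ c.toNat ∧ c.toNat ≤ 70 then some (c.toNat - 55)
  else none

def pvIsHexWS (c : Char) : Bool := c == ' ' || c == '\t' || c == '\n' || c == '\r'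

def pvFromHex? : List Char → Nat → Option Nat
  | [], acc => some acc
  | c :: cs, acc =>
    if pvIsHexWS c then pvFromHex? cs acc
    else
      match pvHexDigit? c with
      | none => none
      | some d1 =>
        match cs with
        | [] => none
        | c2 :: cs2 =>
          match pvHexDigit? c2 with
          | none => none
          | some d2 => pvFromHex? cs2 (acc * 256 + (d1 * 16 + d2))

-- the body of A's `for i in range(85)` loop, acting on the state (x, y, z)
def pvStepA (coord : Int) (s : Int × Int × Int) (i : Int) : Int × Int × Int :=
  (PySem.Int.bor s.1 ((PySem.Int.band (coord >>> (i.toNat * 3)) 1) <<< i.toNat),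
   PySem.Int.bor s.2.1 ((PySem.Int.band (coord >>> (i.toNat * 3 + 1)) 1) <<< i.toNat),
   PySem.Int.bor s.2.2 ((PySem.Int.band (coord >>> (i.toNat * 3 + 2)) 1) <<< i.toNat))

def compute_sectors_from_pubkey (pubkey_hex : String) : Int × Int × Int :=
  let coord_int : Int := ((pvFromHex? pubkey_hex.toList 0).getD 0 : Nat)
  let st := (PySem.List.pyRange 0 85 1).foldl (pvStepA coord_int) (0, 0, 0)
  (st.1 >>> 30, st.2.1 >>> 30, st.2.2 >>> 30)

-- ===== PORT B =====
-- the body of B's `for k in range(254, -1, -1)` loop, acting on the state (x, y, z)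
def pvStepB (coord : Int) (s : Int × Int × Int) (k : Int) : Int × Int × Int :=
  let b := PySem.Int.band (coord >>> k.toNat) 1
  let r := PySem.Int.mod k 3
  if r = 0 then (2 * s.1 + b, s.2.1, s.2.2)
  else if r = 1 then (s.1, 2 * s.2.1 + b, s.2.2)
  else (s.1, s.2.1, 2 * s.2.2 + b)

def compute_sectors_from_pubkey_alt (pubkey_hex : String) : Int × Int × Int :=
  let coord : Int := ((pvFromHex? pubkey_hex.toList 0).getD 0 : Nat)
  let st := (PySem.List.pyRange 254 (-1) (-1)).foldl (pvStepB coord) (0, 0, 0)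
  (st.1 >>> 30, st.2.1 >>> 30, st.2.2 >>> 30)

-- ===== PRECONDITION & SPEC =====
-- Pre_ excludes exactly the inputs where bytes.fromhex raises ValueError: the string must be a
-- sequence of adjacent hex-digit pairs, optionally separated/surrounded by ASCII whitespace.
def pvHexShape : List Char → Bool
  | [] => true
  | c :: cs =>
    if pvIsHexWS c then pvHexShape cs
    else
      match cs with
      | [] => false
      | c2 :: cs2 => (pvHexDigit? c).isSome && (pvHexDigit? c2).isSome && pvHexShape cs2

def Pre_compute_sectors_from_pubkey (pubkey_hex : String) : Prop :=
  pvHexShape pubkey_hex.toList = true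
instance (pubkey_hex : String) : Decidable (Pre_compute_sectors_from_pubkey pubkey_hex) := by unfold Pre_compute_sectors_from_pubkey; infer_instance

def pvWitness_compute_sectors_from_pubkey : String := "0fab"

def Spec_compute_sectors_from_pubkey (pubkey_hex : String) (out : Int × Int × Int) : Prop := out = compute_sectors_from_pubkey_alt pubkey_hex
instance (pubkey_hex : String) (out : Int × Int × Int) : Decidable (Spec_compute_sectors_from_pubkey pubkey_hex out) := by unfold Spec_compute_sectors_from_pubkey; infer_instance

-- ===== CLAIM (what is proved, stated in full; the proofs are below) =====
def Claim_equal_compute_sectors_from_pubkey : Prop := ∀ (pubkey_hex : String), Dom_compute_sectors_from_pubkey pubkey_hex → Pre_compute_sectors_from_pubkey pubkey_hex → Spec_compute_sectors_from_pubkey pubkey_hex (compute_sectors_from_pubkey pubkey_hex)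

-- ===== LEMMAS AND PROOFS =====

-- bit i of N, and the de-interleaved value Σ_{i<m} bit(i*3+o) · 2^i
def pvBit (N j : Nat) : Nat := (N >>> j) % 2

def pvS (N o : Nat) : Nat → Nat
  | 0 => 0
  | m + 1 => pvS N o m + pvBit N (m * 3 + o) * 2 ^ m

lemma pvBit_lt (N j : Nat) : pvBit N j < 2 := Nat.mod_lt _ (by omega)

lemma pvS_lt (N o : Nat) : ∀ m, pvS N o m < 2 ^ m := by
  intro m
  induction m with
  | zero => simp [pvS]
  | succ m ih =>
    have hb := pvBit_lt N (m * 3 + o)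
    have : pvBit N (m * 3 + o) * 2 ^ m ≤ 2 ^ m := by nlinarith
    simp only [pvS, pow_succ]
    omega

lemma pv_lor_two_pow : ∀ (m a : Nat), a < 2 ^ m → a ||| 2 ^ m = a + 2 ^ m := by
  intro m
  induction m with
  | zero => intro a h; interval_cases a; decide
  | succ m ih =>
    intro a h
    have hp : (2 : Nat) ^ (m + 1) = 2 ^ m * 2 := pow_succ 2 m
    have hlt : a / 2 < 2 ^ m := by omega
    have hb : a = Nat.bit (decide (a % 2 = 1)) (a / 2) := by
      rw [Nat.bit_val]
      rcases Nat.mod_two_eq_zero_or_one a with h' | h' <;> simp [h'] <;> omega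
    have h2 : (2 : Nat) ^ (m + 1) = Nat.bit false (2 ^ m) := by
      rw [Nat.bit_val]; simp [hp]; omega
    calc a ||| 2 ^ (m + 1)
        = Nat.bit (decide (a % 2 = 1)) (a / 2) ||| Nat.bit false (2 ^ m) := by rw [← hb, ← h2]
      _ = Nat.bit (decide (a % 2 = 1) || false) (a / 2 ||| 2 ^ m) := Nat.lor_bit _ _ _ _
      _ = Nat.bit (decide (a % 2 = 1)) (a / 2 + 2 ^ m) := by rw [ih _ hlt, Bool.or_false]
      _ = a + 2 ^ (m + 1) := by
          rw [Nat.bit_val]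
          rcases Nat.mod_two_eq_zero_or_one a with h' | h' <;> simp [h', hp] <;> omega

lemma pv_or_add (a b m : Nat) (ha : a < 2 ^ m) (hb : b < 2) :
    a ||| b * 2 ^ m = a + b * 2 ^ m := by
  interval_cases b
  · simp
  · simpa using pv_lor_two_pow m a ha

lemma pv_band_shift (N j : Nat) :
    PySem.Int.band ((N : Int) >>> j) 1 = ((pvBit N j : Nat) : Int) := by
  rw [← Int.natCast_shiftRight]
  have h := PySem.Int.band_natCast (N >>> j) 1
  simpa [pvBit, Nat.and_one_is_mod] using h

lemma pv_bor_step (N o j m : Nat) :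
    PySem.Int.bor ((pvS N o m : Nat) : Int) (((pvBit N j : Nat) : Int) <<< m)
      = ((pvS N o m + pvBit N j * 2 ^ m : Nat) : Int) := by
  rw [← Int.natCast_shiftLeft, PySem.Int.bor_natCast, Nat.shiftLeft_eq,
      pv_or_add _ _ _ (pvS_lt N o m) (pvBit_lt N j)]

lemma pv_foldA_inv (N : Nat) : ∀ m,
    (List.range m).foldl (fun s k => pvStepA ((N : Nat) : Int) s ((k : Nat) : Int)) (0, 0, 0)
      = (((pvS N 0 m : Nat) : Int), ((pvS N 1 m : Nat) : Int), ((pvS N 2 m : Nat) : Int)) := by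
  intro m
  induction m with
  | zero => simp [pvS]
  | succ m ih =>
    rw [List.range_succ, List.foldl_append, ih]
    simp only [List.foldl_cons, List.foldl_nil, pvStepA, Int.toNat_natCast]
    rw [pv_band_shift, pv_band_shift, pv_band_shift,
        pv_bor_step, pv_bor_step, pv_bor_step]
    simp [pvS]

lemma pv_stepB_eval (N : Nat) (s : Int × Int × Int) (k : Nat) :
    pvStepB ((N : Nat) : Int) s ((k : Nat) : Int)
      = if k % 3 = 0 then (2 * s.1 + ((pvBit N k : Nat) : Int), s.2.1, s.2.2)
        else if k % 3 = 1 then (s.1, 2 * s.2.1 + ((pvBit N k : Nat) : Int), s.2.2)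
        else (s.1, s.2.1, 2 * s.2.2 + ((pvBit N k : Nat) : Int)) := by
  have hm : PySem.Int.mod ((k : Nat) : Int) 3 = ((k % 3 : Nat) : Int) := by
    exact_mod_cast PySem.Int.mod_natCast k 3
  simp only [pvStepB, Int.toNat_natCast, pv_band_shift, hm]
  have h3 : k % 3 = 0 ∨ k % 3 = 1 ∨ k % 3 = 2 := by omega
  rcases h3 with h | h | h <;> simp [h]

lemma pv_rev3 (m : Nat) :
    (List.range (m * 3 + 3)).reverse
      = (m * 3 + 2) :: (m * 3 + 1) :: (m * 3) :: (List.range (m * 3)).reverse := by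
  rw [show m * 3 + 3 = (m * 3 + 2) + 1 by omega, List.range_succ,
      show m * 3 + 2 = (m * 3 + 1) + 1 by omega, List.range_succ,
      show m * 3 + 1 = (m * 3) + 1 by omega, List.range_succ]
  simp

lemma pv_foldB_inv (N : Nat) : ∀ (m : Nat) (x0 y0 z0 : Int),
    ((List.range (m * 3)).reverse).foldl
        (fun s k => pvStepB ((N : Nat) : Int) s ((k : Nat) : Int)) (x0, y0, z0)
      = (x0 * 2 ^ m + ((pvS N 0 m : Nat) : Int),
         y0 * 2 ^ m + ((pvS N 1 m : Nat) : Int),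
         z0 * 2 ^ m + ((pvS N 2 m : Nat) : Int)) := by
  intro m
  induction m with
  | zero => intro x0 y0 z0; simp [pvS]
  | succ m ih =>
    intro x0 y0 z0
    have e2 : (m * 3 + 2) % 3 = 2 := by omega
    have e1 : (m * 3 + 1) % 3 = 1 := by omega
    have e0 : (m * 3) % 3 = 0 := by omega
    have s2 : pvStepB ((N : Nat) : Int) (x0, y0, z0) (((m * 3 + 2 : Nat) : Int))
        = (x0, y0, 2 * z0 + ((pvBit N (m * 3 + 2) : Nat) : Int)) := by
      rw [pv_stepB_eval, e2]; norm_num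
    have s1 : pvStepB ((N : Nat) : Int)
          (x0, y0, 2 * z0 + ((pvBit N (m * 3 + 2) : Nat) : Int)) (((m * 3 + 1 : Nat) : Int))
        = (x0, 2 * y0 + ((pvBit N (m * 3 + 1) : Nat) : Int),
           2 * z0 + ((pvBit N (m * 3 + 2) : Nat) : Int)) := by
      rw [pv_stepB_eval, e1]; norm_num
    have s0 : pvStepB ((N : Nat) : Int)
          (x0, 2 * y0 + ((pvBit N (m * 3 + 1) : Nat) : Int),
           2 * z0 + ((pvBit N (m * 3 + 2) : Nat) : Int)) (((m * 3 : Nat) : Int))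
        = (2 * x0 + ((pvBit N (m * 3) : Nat) : Int),
           2 * y0 + ((pvBit N (m * 3 + 1) : Nat) : Int),
           2 * z0 + ((pvBit N (m * 3 + 2) : Nat) : Int)) := by
      rw [pv_stepB_eval, e0]; norm_num
    rw [show (m + 1) * 3 = m * 3 + 3 by ring, pv_rev3]
    simp only [List.foldl_cons]
    rw [s2, s1, s0, ih]
    simp only [Prod.mk.injEq, pvS, Nat.add_zero]
    refine ⟨?_, ?_, ?_⟩ <;> (push_cast; ring)

lemma pv_rangeA : PySem.List.pyRange 0 85 1 = (List.range 85).map (fun k => ((k : Nat) : Int)) := by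
  have h := PySem.List.pyRange_zero_natCast 85
  simpa using h

set_option maxRecDepth 100000 in
lemma pv_rangeB :
    PySem.List.pyRange 254 (-1) (-1) = ((List.range 255).reverse).map (fun k => ((k : Nat) : Int)) := by
  decide

lemma pv_core (N : Nat) :
    ((PySem.List.pyRange 0 85 1).foldl (pvStepA ((N : Nat) : Int)) (0, 0, 0) : Int × Int × Int)
      = (PySem.List.pyRange 254 (-1) (-1)).foldl (pvStepB ((N : Nat) : Int)) (0, 0, 0) := by
  rw [pv_rangeA, pv_rangeB, List.foldl_map, List.foldl_map]
  rw [pv_foldA_inv N 85]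
  rw [show (255 : Nat) = 85 * 3 by norm_num, pv_foldB_inv N 85 0 0 0]
  simp

-- ===== VERDICT (by name: the statement is the Claim_ definition above) =====
theorem compute_sectors_from_pubkey_spec : Claim_equal_compute_sectors_from_pubkey := by
  intro s _ _
  unfold Spec_compute_sectors_from_pubkey
  unfold compute_sectors_from_pubkey compute_sectors_from_pubkey_alt
  exact congrArg (fun st : Int × Int × Int => (st.1 >>> 30, st.2.1 >>> 30, st.2.2 >>> 30))
    (pv_core ((pvFromHex? s.toList 0).getD 0))
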